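-- pv_equiv track=rewrite | github.com/e0406370/reetkode | python/lce_p1165_single-row_keyboard.py | calculateTimeAlt
-- ===== SOURCE A (Python) =====
-- def calculateTimeAlt(keyboard: str, word: str) -> int:
--     curr_idx = 0
--     time_taken = 0
--
--     key_pos = {ch: idx for idx, ch in enumerate(keyboard)}
--
--     for ch in word:
--         next_idx = key_pos[ch]
--         time_taken += abs(next_idx - curr_idx)
--         curr_idx = next_idx
--
--     return time_taken
-- ===== SOURCE B (Python) =====
-- def calculateTimeAlt(keyboard: str, word: str) -> int:
--     # Gap-crossing count: each move pos->nxt crosses exactly the gaps g with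
--     # min <= g < max, so mark every move as a +1/-1 interval on a difference
--     # array over keyboard positions and sum the coverage in one sweep:
--     # total = sum over gaps of (number of moves crossing that gap) = sum |nxt - pos|.
--     key_pos = {ch: idx for idx, ch in enumerate(keyboard)}
--     n = len(keyboard)
--     diff = [0] * (n + 1)
--     pos = 0
--     for ch in word:
--         nxt = key_pos[ch]
--         lo, hi = (pos, nxt) if pos <= nxt else (nxt, pos)
--         diff[lo] += 1
--         diff[hi] -= 1
--         pos = nxt
--     total = 0
--     cover = 0
--     for g in range(n):
--         cover += diff[g]
--         total += cover
--     return total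
-- ===== Notes on version B (the rewrite author's own statement) =====
-- stated objective: alternative
-- what changed: Replaced A's direct accumulation of |next-curr| by a gap-crossing count: each move is recorded as a +1/-1 interval on a difference array over keyboard positions, and the answer is obtained by a separate prefix-sum sweep summing how many moves cross each gap.
import Mathlib
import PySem

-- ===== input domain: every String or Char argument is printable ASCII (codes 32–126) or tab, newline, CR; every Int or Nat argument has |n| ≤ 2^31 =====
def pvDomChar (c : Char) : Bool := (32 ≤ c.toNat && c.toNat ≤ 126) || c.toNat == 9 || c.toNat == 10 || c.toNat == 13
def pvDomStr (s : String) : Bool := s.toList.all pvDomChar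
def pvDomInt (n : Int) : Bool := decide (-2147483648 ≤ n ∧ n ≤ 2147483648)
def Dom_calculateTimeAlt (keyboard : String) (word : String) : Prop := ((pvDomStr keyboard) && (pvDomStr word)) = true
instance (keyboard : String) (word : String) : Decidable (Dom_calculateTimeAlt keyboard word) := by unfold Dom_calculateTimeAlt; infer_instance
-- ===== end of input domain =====

-- B replaces A's direct |next-curr| accumulation by a gap-crossing count: moves are recorded as +1/-1 intervals on a difference array over keyboard positions and a prefix-sum sweep adds up how many moves cross each gap (alternative algorithm, same cost).


-- ===== PORT A =====
def calculateTimeAlt (keyboard : String) (word : String) : Int :=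
  let keyPos : PySem.Dict Char Int :=
    (PySem.List.enumerate keyboard.toList).foldl (fun d p => d.insert p.2 p.1) PySem.Dict.empty
  -- for ch in word: next_idx = key_pos[ch]; time_taken += abs(next_idx - curr_idx); curr_idx = next_idx
  -- key_pos[ch] raises KeyError when ch is not a keyboard key; Pre_ excludes that, 0 is a dummy there
  (word.toList.foldl (fun (st : Int × Int) ch =>
      let nextIdx := keyPos.getD ch 0
      (nextIdx, st.2 + |nextIdx - st.1|)) (0, 0)).2

-- ===== PORT B =====
def calculateTimeAlt_alt (keyboard : String) (word : String) : Int :=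
  let keyPos : PySem.Dict Char Int :=
    (PySem.List.enumerate keyboard.toList).foldl (fun d p => d.insert p.2 p.1) PySem.Dict.empty
  let n : Int := PySem.Str.len keyboard
  -- diff = [0] * (n + 1)
  -- for ch in word: nxt = key_pos[ch]; lo,hi = sorted pair; diff[lo] += 1; diff[hi] -= 1; pos = nxt
  -- (key_pos[ch] as in A: KeyError excluded by Pre_, 0 dummy; diff indices are then in range,
  --  so pySetD/pyGetD are exact)
  let st := word.toList.foldl (fun (st : List Int × Int) ch =>
      let nxt := keyPos.getD ch 0
      let pos := st.2
      let lohi := if pos ≤ nxt then (pos, nxt) else (nxt, pos)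
      let d1 := PySem.List.pySetD st.1 lohi.1 (PySem.List.pyGetD st.1 lohi.1 0 + 1)
      let d2 := PySem.List.pySetD d1 lohi.2 (PySem.List.pyGetD d1 lohi.2 0 - 1)
      (d2, nxt)) (List.replicate (n.toNat + 1) 0, 0)
  -- total = 0; cover = 0; for g in range(n): cover += diff[g]; total += cover
  ((PySem.List.pyRange 0 n 1).foldl (fun (p : Int × Int) g =>
      let cover := p.1 + PySem.List.pyGetD st.1 g 0
      (cover, p.2 + cover)) (0, 0)).2

-- ===== PRECONDITION & SPEC =====
-- Pre_ excludes exactly the inputs where Python's key_pos[ch] raises KeyError (a word character absent from keyboard).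
def Pre_calculateTimeAlt (keyboard : String) (word : String) : Prop :=
  (word.toList.all (fun ch => keyboard.toList.contains ch)) = true
instance (keyboard : String) (word : String) : Decidable (Pre_calculateTimeAlt keyboard word) := by unfold Pre_calculateTimeAlt; infer_instance
def pvWitness_calculateTimeAlt : String × String := ("ab", "b")

def Spec_calculateTimeAlt (keyboard : String) (word : String) (out : Int) : Prop := out = calculateTimeAlt_alt keyboard word
instance (keyboard : String) (word : String) (out : Int) : Decidable (Spec_calculateTimeAlt keyboard word out) := by unfold Spec_calculateTimeAlt; infer_instance

-- ===== CLAIM (what is proved, stated in full; the proofs are below) =====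
def Claim_equal_calculateTimeAlt : Prop := ∀ (keyboard : String) (word : String), Dom_calculateTimeAlt keyboard word → Pre_calculateTimeAlt keyboard word → Spec_calculateTimeAlt keyboard word (calculateTimeAlt keyboard word)

-- ===== LEMMAS AND PROOFS =====

/-- prefix sum of the first `n` entries of the difference array -/
def pvPS (d : List Int) (n : Nat) : Int := ∑ j ∈ Finset.range n, d.getD j 0

/-- B's sweep total: sum over gaps `g < n` of the coverage `pvPS d (g+1)` -/
def pvTot (d : List Int) (n : Nat) : Int := ∑ g ∈ Finset.range n, pvPS d (g + 1)

theorem pvPS_replicate (m n : Nat) : pvPS (List.replicate m (0 : Int)) n = 0 := by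
  unfold pvPS
  simp [List.getD]

theorem pvTot_replicate (m n : Nat) : pvTot (List.replicate m (0 : Int)) n = 0 := by
  unfold pvTot
  simp [pvPS_replicate]

/-- the sweep fold computes `(pvPS, pvTot)` -/
theorem pv_sweep_eq (d : List Int) (n : Nat) :
    (PySem.List.pyRange 0 (n : Int) 1).foldl (fun (p : Int × Int) g =>
        (p.1 + PySem.List.pyGetD d g 0, p.2 + (p.1 + PySem.List.pyGetD d g 0))) (0, 0)
      = (pvPS d n, pvTot d n) := by
  induction n with
  | zero => simp [PySem.List.pyRange_one_eq_nil, pvPS, pvTot]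
  | succ k ih =>
    have h1 : ((k + 1 : Nat) : Int) = (k : Int) + 1 := by push_cast; ring
    rw [h1, PySem.List.pyRange_one_succ_right (by positivity), List.foldl_append, ih]
    simp [pvPS, pvTot, Finset.sum_range_succ]

theorem pv_sum_ite_le (j n : Nat) (v : Int) :
    (∑ g ∈ Finset.range n, if j ≤ g then v else 0) = ((n - j : Nat) : Int) * v := by
  induction n with
  | zero => simp
  | succ k ih =>
    rw [Finset.sum_range_succ, ih]
    by_cases h : j ≤ k
    · have : k + 1 - j = (k - j) + 1 := by omega
      rw [this, if_pos h]; push_cast; ring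
    · have h1 : k + 1 - j = 0 := by omega
      have h2 : k - j = 0 := by omega
      rw [h1, if_neg h, h2]; simp

theorem pv_getD_set (d : List Int) (j i : Nat) (w : Int) (hj : j < d.length) :
    (d.set j w).getD i 0 = if i = j then w else d.getD i 0 := by
  simp [List.getD, List.getElem?_set]
  split_ifs with h1 h2 h2
  · simp
  · omega
  · omega
  · rfl

theorem pvPS_set (d : List Int) (j n : Nat) (w : Int) (hj : j < d.length) :
    pvPS (d.set j w) n = pvPS d n + (if j < n then w - d.getD j 0 else 0) := by
  unfold pvPS
  by_cases h : j < n
  · rw [if_pos h]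
    have : ∀ i ∈ Finset.range n, (d.set j w).getD i 0
        = (if i = j then w - d.getD j 0 else 0) + d.getD i 0 := by
      intro i _
      rw [pv_getD_set d j i w hj]
      split_ifs with h1 <;> simp [h1]
    rw [Finset.sum_congr rfl this, Finset.sum_add_distrib,
        Finset.sum_ite_eq' (Finset.range n) j (fun _ => w - d.getD j 0)]
    simp [Finset.mem_range.mpr h]
    ring
  · rw [if_neg h]
    have : ∀ i ∈ Finset.range n, (d.set j w).getD i 0 = d.getD i 0 := by
      intro i hi
      rw [pv_getD_set d j i w hj, if_neg (by simp at hi; omega)]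
    rw [Finset.sum_congr rfl this]; ring

theorem pvTot_set (d : List Int) (j n : Nat) (w : Int) (hj : j < d.length) :
    pvTot (d.set j w) n = pvTot d n + ((n - j : Nat) : Int) * (w - d.getD j 0) := by
  unfold pvTot
  have : ∀ g ∈ Finset.range n, pvPS (d.set j w) (g + 1)
      = pvPS d (g + 1) + (if j ≤ g then w - d.getD j 0 else 0) := by
    intro g _
    rw [pvPS_set d j (g+1) w hj]
    congr 1
    split_ifs with h1 h2 h2 <;> first | rfl | omega
  rw [Finset.sum_congr rfl this, Finset.sum_add_distrib, pv_sum_ite_le]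

/-- a `+1` bump at `lo` and a `-1` bump at `hi` raise the sweep total by `hi - lo` -/
theorem pv_bump2 (d : List Int) (lo hi n : Nat) (hlo : lo ≤ hi) (hhi : hi < n)
    (hlen : n < d.length) :
    pvTot ((d.set lo (d.getD lo 0 + 1)).set hi
            ((d.set lo (d.getD lo 0 + 1)).getD hi 0 - 1)) n
      = pvTot d n + ((hi : Int) - (lo : Int)) := by
  have h1 : lo < d.length := by omega
  have h2 : hi < (d.set lo (d.getD lo 0 + 1)).length := by simp; omega
  rw [pvTot_set _ hi n _ h2, pvTot_set d lo n _ h1]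
  have c1 : ((n - lo : Nat) : Int) = (n : Int) - lo := by omega
  have c2 : ((n - hi : Nat) : Int) = (n : Int) - hi := by omega
  rw [c1, c2]; ring

theorem pv_pyGetD_toNat (d : List Int) (i : Int) (h0 : 0 ≤ i) (h1 : i < (d.length : Int)) :
    PySem.List.pyGetD d i 0 = d.getD i.toNat 0 := by
  rw [PySem.List.pyGetD_eq_getElem d 0 h0 (by simpa using h1)]
  rw [List.getD_eq_getElem d 0 (by omega)]

/-- main loop invariant: the sweep total of B's difference array grows exactly by
    A's accumulated travel distance -/
theorem pv_main (f : Char → Int) (n : Nat) :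
    ∀ (chars : List Char) (d : List Int) (pos t : Int),
      (∀ ch ∈ chars, 0 ≤ f ch ∧ f ch < (n : Int)) →
      d.length = n + 1 → 0 ≤ pos → pos < (n : Int) →
      pvTot (chars.foldl (fun (st : List Int × Int) ch =>
          (PySem.List.pySetD
              (PySem.List.pySetD st.1 (if st.2 ≤ f ch then (st.2, f ch) else (f ch, st.2)).1
                (PySem.List.pyGetD st.1 (if st.2 ≤ f ch then (st.2, f ch) else (f ch, st.2)).1 0 + 1))
              (if st.2 ≤ f ch then (st.2, f ch) else (f ch, st.2)).2
              (PySem.List.pyGetD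
                (PySem.List.pySetD st.1 (if st.2 ≤ f ch then (st.2, f ch) else (f ch, st.2)).1
                  (PySem.List.pyGetD st.1 (if st.2 ≤ f ch then (st.2, f ch) else (f ch, st.2)).1 0 + 1))
                (if st.2 ≤ f ch then (st.2, f ch) else (f ch, st.2)).2 0 - 1),
           f ch)) (d, pos)).1 n
        = pvTot d n +
          ((chars.foldl (fun (st : Int × Int) ch => (f ch, st.2 + |f ch - st.1|)) (pos, t)).2 - t) := by
  intro chars
  induction chars with
  | nil => intro d pos t _ _ _ _; simp
  | cons ch rest ih =>
    intro d pos t hf hd hp0 hpn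
    obtain ⟨hn0, hnn⟩ := hf ch (List.mem_cons_self)
    simp only [List.foldl_cons]
    by_cases hc : pos ≤ f ch
    · rw [if_pos hc]
      simp only []
      rw [PySem.List.pySetD_of_nonneg _ _ hp0,
          pv_pyGetD_toNat d pos hp0 (by rw [hd]; push_cast; omega),
          PySem.List.pySetD_of_nonneg _ _ hn0,
          pv_pyGetD_toNat _ (f ch) hn0 (by simp [hd]; omega)]
      rw [ih _ (f ch) (t + |f ch - pos|)
            (fun c hc' => hf c (List.mem_cons_of_mem _ hc')) (by simp [hd]) hn0 hnn]
      rw [pv_bump2 d pos.toNat (f ch).toNat n (by omega) (by omega) (by omega)]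
      have : |f ch - pos| = ((f ch).toNat : Int) - (pos.toNat : Int) := by
        rw [abs_of_nonneg (by omega)]; omega
      rw [this]; ring
    · rw [if_neg hc]
      simp only []
      have hc' : f ch < pos := by omega
      rw [PySem.List.pySetD_of_nonneg _ _ hn0,
          pv_pyGetD_toNat d (f ch) hn0 (by rw [hd]; push_cast; omega),
          PySem.List.pySetD_of_nonneg _ _ hp0,
          pv_pyGetD_toNat _ pos hp0 (by simp [hd]; omega)]
      rw [ih _ (f ch) (t + |f ch - pos|)
            (fun c hc2 => hf c (List.mem_cons_of_mem _ hc2)) (by simp [hd]) hn0 hnn]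
      rw [pv_bump2 d (f ch).toNat pos.toNat n (by omega) (by omega) (by omega)]
      have : |f ch - pos| = ((pos.toNat) : Int) - (((f ch).toNat) : Int) := by
        rw [abs_of_neg (by omega)]; omega
      rw [this]; ring

theorem pv_keyPos_not_mem (l : List Char) :
    ∀ (s : Int) (d : PySem.Dict Char Int) (ch : Char), ch ∉ l →
      ((PySem.List.enumerate l s).foldl (fun d p => d.insert p.2 p.1) d).get? ch = d.get? ch := by
  induction l with
  | nil => intro s d ch _; simp [PySem.List.enumerate_nil]
  | cons c rest ih =>
    intro s d ch h
    rw [PySem.List.enumerate_cons, List.foldl_cons]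
    rw [ih (s+1) _ ch (fun hm => h (List.mem_cons_of_mem _ hm))]
    exact PySem.Dict.get?_insert_of_ne _ _ (fun he => h (he ▸ List.mem_cons_self))

/-- a key present in `l` gets, from the enumerate-insert fold, a value `s + k` with `k < l.length` -/
theorem pv_keyPos_mem (l : List Char) :
    ∀ (s : Int) (d : PySem.Dict Char Int) (ch : Char), ch ∈ l →
      ∃ k : Nat, k < l.length ∧
        ((PySem.List.enumerate l s).foldl (fun d p => d.insert p.2 p.1) d).get? ch = some (s + k) := by
  induction l with
  | nil => intro s d ch h; simp at h
  | cons c rest ih =>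
    intro s d ch h
    rw [PySem.List.enumerate_cons, List.foldl_cons]
    by_cases hm : ch ∈ rest
    · obtain ⟨k, hk, he⟩ := ih (s+1) (d.insert c s) ch hm
      exact ⟨k + 1, by simp; omega, by rw [he]; congr 1; push_cast; ring⟩
    · have hcc : ch = c := by rcases List.mem_cons.mp h with h1 | h1; exact h1; exact absurd h1 hm
      refine ⟨0, by simp, ?_⟩
      rw [pv_keyPos_not_mem rest (s+1) _ ch hm, hcc]
      simp [PySem.Dict.get?_insert_self]

-- ===== VERDICT (by name: the statement is the Claim_ definition above) =====
theorem calculateTimeAlt_spec : Claim_equal_calculateTimeAlt := by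
  intro kb w _ hpre
  show calculateTimeAlt kb w = calculateTimeAlt_alt kb w
  unfold calculateTimeAlt calculateTimeAlt_alt
  simp only [PySem.Str.len_eq, Int.toNat_natCast]
  rw [pv_sweep_eq]
  have hpre' : ∀ ch ∈ w.toList, ch ∈ kb.toList := by
    intro ch hch
    have := List.all_eq_true.mp hpre ch hch
    simpa using this
  have hf : ∀ ch ∈ w.toList, 0 ≤ ((PySem.List.enumerate kb.toList 0).foldl
        (fun d p => d.insert p.2 p.1) PySem.Dict.empty).getD ch 0 ∧
      ((PySem.List.enumerate kb.toList 0).foldl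
        (fun d p => d.insert p.2 p.1) PySem.Dict.empty).getD ch 0 < (kb.toList.length : Int) := by
    intro ch hch
    obtain ⟨k, hk, he⟩ := pv_keyPos_mem kb.toList 0 PySem.Dict.empty ch (hpre' ch hch)
    rw [PySem.Dict.getD_of_get?_eq_some _ 0 he]
    constructor <;> [positivity; omega]
  cases hw : w.toList with
  | nil => simp [pvTot_replicate]
  | cons c cs =>
    have hn : 0 < kb.toList.length := by
      have := hpre' c (by rw [hw]; exact List.mem_cons_self)
      exact List.length_pos_of_mem this
    rw [← hw]
    rw [pv_main (fun ch => ((PySem.List.enumerate kb.toList 0).foldl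
          (fun d p => d.insert p.2 p.1) PySem.Dict.empty).getD ch 0) kb.toList.length
          w.toList (List.replicate (kb.toList.length + 1) 0) 0 0 hf
          (by simp) le_rfl (by exact_mod_cast hn)]
    rw [pvTot_replicate]
    ring
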